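-- pv_equiv track=rewrite | github.com/Dylandutp/checked_content_detector | checkbox_finder/checkbox_finder.py | __merge_vertical_lines
-- ===== SOURCE A (Python) =====
-- def __merge_vertical_lines(lines: list, template_width: int) -> list:
--     """
--     合併相鄰距離小於模板寬度的垂直線。
--
--     參數:
--     lines (list): 延伸到頁首和頁尾的垂直線列表，每條線表示為 (x1, y1, x2, y2)。
--     template_width (int): 模板的寬度。
--
--     返回:
--     list: 合併後的垂直線列表。
--     """
--     if not lines:
--         return []
--
--     lines = sorted(lines, key=lambda x: x[0])
--     merged_lines = [lines[0]]
--
--     for current in lines[1:]: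
--         previous = merged_lines[-1]
--         if current[0] - previous[0] < template_width:
--             merged_lines[-1] = (previous[0], previous[1], current[2], current[3])
--         else:
--             merged_lines.append(current)
--
--     return merged_lines
-- ===== SOURCE B (Python) =====
-- def __merge_vertical_lines(lines: list, template_width: int) -> list:
--     """Index-based clustering by binary search: sort by x, then for each cluster
--     anchor find the cluster's end with a hand-written binary search for the first
--     x >= anchor_x + template_width (valid since the x's are sorted), and emit
--     (anchor.x1, anchor.y1, end-1.x2, end-1.y2) directly from the indices."""
--     if not lines:
--         return []
--     lines = sorted(lines, key=lambda x: x[0])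
--     n = len(lines)
--     merged = []
--     i = 0
--     while i < n:
--         bound = lines[i][0] + template_width
--         lo, hi = i + 1, n
--         while lo < hi:
--             mid = (lo + hi) // 2
--             if lines[mid][0] < bound:
--                 lo = mid + 1
--             else:
--                 hi = mid
--         merged.append((lines[i][0], lines[i][1], lines[lo - 1][2], lines[lo - 1][3]))
--         i = lo
--     return merged
-- ===== Notes on version B (the rewrite author's own statement) =====
-- stated objective: alternative
-- what changed: B replaces A's element-by-element pass that destructively rewrites the last output tuple with index-based clustering: after sorting it binary-searches, for each cluster anchor, the first index whose x is >= anchor_x + template_width (valid because the x's are sorted) and emits the merged tuple directly from the anchor and end indices, never revisiting or rewriting output.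
import Mathlib
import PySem

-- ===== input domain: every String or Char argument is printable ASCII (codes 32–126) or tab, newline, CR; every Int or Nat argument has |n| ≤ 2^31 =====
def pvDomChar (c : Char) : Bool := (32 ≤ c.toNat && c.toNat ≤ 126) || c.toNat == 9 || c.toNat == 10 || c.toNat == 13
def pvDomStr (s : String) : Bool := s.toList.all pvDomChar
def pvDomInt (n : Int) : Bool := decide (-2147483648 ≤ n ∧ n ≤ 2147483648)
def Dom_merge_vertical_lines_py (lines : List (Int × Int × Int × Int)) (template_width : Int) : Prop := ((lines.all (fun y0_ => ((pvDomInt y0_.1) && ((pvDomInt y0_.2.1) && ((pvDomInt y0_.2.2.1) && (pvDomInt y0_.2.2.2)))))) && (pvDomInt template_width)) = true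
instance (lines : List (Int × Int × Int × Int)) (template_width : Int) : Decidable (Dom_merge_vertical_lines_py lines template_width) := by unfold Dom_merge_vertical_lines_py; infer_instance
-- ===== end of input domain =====

-- B replaces A's element-by-element pass that destructively rewrites the last output tuple with
-- index-based clustering: after sorting, each cluster's end is found by a binary search for the
-- first x >= anchor_x + template_width (valid since the x's are sorted), and the merged tuple is
-- emitted directly from the anchor and end indices. Objective: alternative algorithm, same cost.

-- ===== PORT A =====
-- Literal transliteration of A: guard, sort by x1, seed merged with the first line, then a foldl
-- over the tail that either rewrites the LAST element of merged (merged[-1] = …) or appends.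
-- merged is always nonempty, so merged[-1] is getLastD and 'merged[-1] = v' is dropLast ++ [v].
def merge_vertical_lines_py (lines : List (Int × Int × Int × Int)) (template_width : Int) : List (Int × Int × Int × Int) :=
  if lines = [] then []
  else
    match PySem.List.sorted lines (fun x => x.1) false with
    | [] => []   -- unreachable: sorted of a nonempty list is nonempty
    | first :: rest =>
      rest.foldl (fun merged current =>
        let previous := merged.getLastD (0, 0, 0, 0)
        if current.1 - previous.1 < template_width then
          merged.dropLast ++ [(previous.1, previous.2.1, current.2.2.1, current.2.2.2)]
        else
          merged ++ [current]) [first]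

-- ===== PORT B =====
-- Inner while-loop of Source B: binary search for the first index in [lo, hi) whose x1 is >= bound
-- (hi if none). The fuel argument only makes the loop total: fuel = hi - lo always suffices.
-- lines[mid] is always in range in Source B; the getD default is never read.
def pvBsearch (ls : List (Int × Int × Int × Int)) (bound : Int) : Nat → Nat → Nat → Nat
  | 0, lo, _ => lo
  | fuel + 1, lo, hi =>
    if lo < hi then
      if (ls.getD ((lo + hi) / 2) (0, 0, 0, 0)).1 < bound then
        pvBsearch ls bound fuel ((lo + hi) / 2 + 1) hi
      else
        pvBsearch ls bound fuel lo ((lo + hi) / 2)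
    else lo

-- end index of the cluster anchored at index i (the 'lo' Source B computes for anchor i)
def pvClusterEnd (ls : List (Int × Int × Int × Int)) (w : Int) (i : Nat) : Nat :=
  pvBsearch ls ((ls.getD i (0, 0, 0, 0)).1 + w) (ls.length - (i + 1)) (i + 1) ls.length

-- outer while-loop of Source B: walk the anchors, emitting one merged tuple per cluster
-- (fuel = ls.length - i suffices: the anchor index strictly increases each iteration)
def pvOuter (ls : List (Int × Int × Int × Int)) (w : Int) : Nat → Nat → List (Int × Int × Int × Int)
  | 0, _ => []
  | fuel + 1, i =>
    if i < ls.length then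
      ((ls.getD i (0, 0, 0, 0)).1, (ls.getD i (0, 0, 0, 0)).2.1,
       (ls.getD (pvClusterEnd ls w i - 1) (0, 0, 0, 0)).2.2.1,
       (ls.getD (pvClusterEnd ls w i - 1) (0, 0, 0, 0)).2.2.2)
        :: pvOuter ls w fuel (pvClusterEnd ls w i)
    else []

def merge_vertical_lines_py_alt (lines : List (Int × Int × Int × Int)) (template_width : Int) : List (Int × Int × Int × Int) :=
  if lines = [] then []
  else
    pvOuter (PySem.List.sorted lines (fun x => x.1) false) template_width
      (PySem.List.sorted lines (fun x => x.1) false).length 0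

-- ===== PRECONDITION & SPEC =====
def Spec_merge_vertical_lines_py (lines : List (Int × Int × Int × Int)) (template_width : Int) (out : List (Int × Int × Int × Int)) : Prop := out = merge_vertical_lines_py_alt lines template_width
instance (lines : List (Int × Int × Int × Int)) (template_width : Int) (out : List (Int × Int × Int × Int)) : Decidable (Spec_merge_vertical_lines_py lines template_width out) := by unfold Spec_merge_vertical_lines_py; infer_instance

-- ===== CLAIM (what is proved, stated in full; the proofs are below) =====
def Claim_equal_merge_vertical_lines_py : Prop := ∀ (lines : List (Int × Int × Int × Int)) (template_width : Int), Dom_merge_vertical_lines_py lines template_width → Spec_merge_vertical_lines_py lines template_width (merge_vertical_lines_py lines template_width)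

-- ===== LEMMAS AND PROOFS =====

-- Common intermediate form: clustering by takeWhile/dropWhile on the anchor's x.
-- pvS a c summarizes the cluster with anchor a and tail c.
def pvS (a : Int × Int × Int × Int) (c : List (Int × Int × Int × Int)) : Int × Int × Int × Int :=
  (a.1, a.2.1, (c.getLastD a).2.2.1, (c.getLastD a).2.2.2)

def pvSpan (w : Int) : List (Int × Int × Int × Int) → List (Int × Int × Int × Int)
  | [] => []
  | a :: rs =>
      pvS a (rs.takeWhile (fun q => decide (q.1 - a.1 < w)))
        :: pvSpan w (rs.dropWhile (fun q => decide (q.1 - a.1 < w)))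
termination_by ls => ls.length
decreasing_by
  have := List.length_dropWhile_le (fun q : Int × Int × Int × Int => decide (q.1 - a.1 < w)) rs
  simp; omega

-- ----- A's fold equals pvSpan -----
theorem pv_fold_eq_span (w : Int) :
    ∀ (rest : List (Int × Int × Int × Int)) (a : Int × Int × Int × Int)
      (c done : List (Int × Int × Int × Int)),
    rest.foldl (fun merged current =>
        let previous := merged.getLastD (0, 0, 0, 0)
        if current.1 - previous.1 < w then
          merged.dropLast ++ [(previous.1, previous.2.1, current.2.2.1, current.2.2.2)]
        else
          merged ++ [current]) (done ++ [pvS a c])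
      = done ++ pvS a (c ++ rest.takeWhile (fun q => decide (q.1 - a.1 < w)))
          :: pvSpan w (rest.dropWhile (fun q => decide (q.1 - a.1 < w))) := by
  intro rest
  induction rest with
  | nil => intro a c done; simp [pvSpan]
  | cons l rs ih =>
    intro a c done
    have hlast : (done ++ [pvS a c]).getLastD (0,0,0,0) = pvS a c := by simp
    have hdrop : (done ++ [pvS a c]).dropLast = done := by simp
    simp only [List.foldl_cons, hlast, hdrop]
    by_cases h : l.1 - a.1 < w
    · rw [if_pos (show l.1 - (pvS a c).1 < w from h)]
      have hinit : done ++ [((pvS a c).1, (pvS a c).2.1, l.2.2.1, l.2.2.2)]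
          = done ++ [pvS a (c ++ [l])] := by simp [pvS]
      rw [hinit, ih a (c ++ [l]) done]
      simp [h, List.append_assoc]
    · rw [if_neg (show ¬ l.1 - (pvS a c).1 < w from h)]
      have hinit : (done ++ [pvS a c]) ++ [l] = (done ++ [pvS a c]) ++ [pvS l []] := by
        simp [pvS]
      rw [hinit, ih l [] (done ++ [pvS a c])]
      rw [show pvSpan w (List.dropWhile (fun q => decide (q.1 - a.1 < w)) (l :: rs))
            = pvSpan w (l :: rs) from by simp [List.dropWhile, h]]
      rw [show pvSpan w (l :: rs)
            = pvS l (rs.takeWhile (fun q => decide (q.1 - l.1 < w)))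
                :: pvSpan w (rs.dropWhile (fun q => decide (q.1 - l.1 < w))) from by
          rw [pvSpan]]
      simp [List.takeWhile, h]

-- ----- B's binary search + index walk equals pvSpan on a sorted list -----
theorem pvBsearch_ge (ls : List (Int × Int × Int × Int)) (bound : Int) :
    ∀ fuel lo hi, lo ≤ pvBsearch ls bound fuel lo hi := by
  intro fuel
  induction fuel with
  | zero => intro lo hi; simp [pvBsearch]
  | succ f ih =>
    intro lo hi
    rw [pvBsearch]
    split_ifs with h1 h2
    · exact Nat.le_trans (by omega) (ih ((lo + hi) / 2 + 1) hi)
    · exact ih lo ((lo + hi) / 2)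
    · exact Nat.le_refl lo

theorem pvBsearch_le (ls : List (Int × Int × Int × Int)) (bound : Int) :
    ∀ fuel lo hi, lo ≤ hi → pvBsearch ls bound fuel lo hi ≤ hi := by
  intro fuel
  induction fuel with
  | zero => intro lo hi h; simpa [pvBsearch] using h
  | succ f ih =>
    intro lo hi h
    rw [pvBsearch]
    split_ifs with h1 h2
    · exact ih ((lo + hi) / 2 + 1) hi (by omega)
    · exact Nat.le_trans (ih lo ((lo + hi) / 2) (by omega)) (by omega)
    · exact h

theorem pvBsearch_lt_bound (ls : List (Int × Int × Int × Int)) (bound : Int)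
    (hsort : ∀ p q : Nat, p ≤ q → q < ls.length →
      (ls.getD p (0,0,0,0)).1 ≤ (ls.getD q (0,0,0,0)).1) :
    ∀ fuel lo hi, hi - lo ≤ fuel → hi ≤ ls.length →
      ∀ j, lo ≤ j → j < pvBsearch ls bound fuel lo hi →
      (ls.getD j (0,0,0,0)).1 < bound := by
  intro fuel
  induction fuel with
  | zero =>
    intro lo hi hf hhi j hj hjr
    simp [pvBsearch] at hjr
    omega
  | succ f ih =>
    intro lo hi hf hhi j hj hjr
    rw [pvBsearch] at hjr
    split_ifs at hjr with h1 h2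
    · by_cases hj2 : (lo + hi) / 2 + 1 ≤ j
      · exact ih ((lo + hi) / 2 + 1) hi (by omega) hhi j hj2 hjr
      · have : (ls.getD j (0,0,0,0)).1 ≤ (ls.getD ((lo + hi) / 2) (0,0,0,0)).1 :=
          hsort j ((lo + hi) / 2) (by omega) (by omega)
        omega
    · exact ih lo ((lo + hi) / 2) (by omega) (by omega) j hj hjr
    · omega

theorem pvBsearch_ge_bound (ls : List (Int × Int × Int × Int)) (bound : Int) :
    ∀ fuel lo hi, hi - lo ≤ fuel →
      pvBsearch ls bound fuel lo hi < hi →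
      bound ≤ (ls.getD (pvBsearch ls bound fuel lo hi) (0,0,0,0)).1 := by
  intro fuel
  induction fuel with
  | zero =>
    intro lo hi hf hr
    simp [pvBsearch] at hr ⊢
    omega
  | succ f ih =>
    intro lo hi hf hr
    rw [pvBsearch] at hr ⊢
    split_ifs at hr ⊢ with h1 h2
    · exact ih ((lo + hi) / 2 + 1) hi (by omega) hr
    · by_cases hm : pvBsearch ls bound f lo ((lo + hi) / 2) < (lo + hi) / 2
      · exact ih lo ((lo + hi) / 2) (by omega) hm
      · have hle := pvBsearch_le ls bound f lo ((lo + hi) / 2) (by omega)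
        have heq : pvBsearch ls bound f lo ((lo + hi) / 2) = (lo + hi) / 2 := by omega
        rw [heq]; omega
    · omega

theorem pv_takeWhile_drop (p : (Int × Int × Int × Int) → Bool) :
    ∀ (xs : List (Int × Int × Int × Int)) (t : Nat), t ≤ xs.length →
      (∀ j, j < t → p (xs.getD j (0,0,0,0)) = true) →
      (t < xs.length → p (xs.getD t (0,0,0,0)) = false) →
      xs.takeWhile p = xs.take t ∧ xs.dropWhile p = xs.drop t := by
  intro xs
  induction xs with
  | nil => intro t ht _ _; simp at ht; simp [ht]
  | cons x xs ih =>
    intro t ht htrue hfalse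
    cases t with
    | zero =>
      have hx : p x = false := by
        have := hfalse (by simp); simpa using this
      simp [List.takeWhile, List.dropWhile, hx]
    | succ t' =>
      have hx : p x = true := by
        have := htrue 0 (by omega); simpa using this
      have ih' := ih t' (by simpa using ht)
        (fun j hj => by have := htrue (j + 1) (by omega); simpa using this)
        (fun hlt => by have := hfalse (by simpa using hlt); simpa using this)
      simp [List.takeWhile, List.dropWhile, hx, ih'.1, ih'.2]

theorem pv_getLastD_take (xs : List (Int × Int × Int × Int)) (t : Nat) (a : Int × Int × Int × Int)
    (h0 : 0 < t) (h1 : t ≤ xs.length) :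
    (xs.take t).getLastD a = xs.getD (t - 1) (0,0,0,0) := by
  have hlen : (xs.take t).length = t := by simp; omega
  have hne : xs.take t ≠ [] := by
    intro h; rw [h] at hlen; simp at hlen; omega
  rw [List.getLastD_eq_getLast?, List.getLast?_eq_getElem?,
    List.getD_eq_getElem?_getD]
  rw [hlen, List.getElem?_take, if_pos (by omega)]
  cases hx : xs[t-1]? with
  | none => rw [List.getElem?_eq_none_iff] at hx; omega
  | some v => simp

theorem pv_getD_drop (ls : List (Int × Int × Int × Int)) (i j : Nat) :
    (ls.drop i).getD j (0,0,0,0) = ls.getD (i + j) (0,0,0,0) := by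
  rw [List.getD_eq_getElem?_getD, List.getD_eq_getElem?_getD, List.getElem?_drop]

theorem pvOuter_eq_span (ls : List (Int × Int × Int × Int)) (w : Int)
    (hsort : ∀ p q : Nat, p ≤ q → q < ls.length →
      (ls.getD p (0,0,0,0)).1 ≤ (ls.getD q (0,0,0,0)).1) :
    ∀ fuel i, ls.length - i ≤ fuel → pvOuter ls w fuel i = pvSpan w (ls.drop i) := by
  intro fuel
  induction fuel with
  | zero =>
    intro i hi
    rw [pvOuter, List.drop_eq_nil_of_le (by omega), pvSpan]
  | succ k ih =>
    intro i hi
    by_cases h : i < ls.length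
    · have hCE : pvClusterEnd ls w i
          = pvBsearch ls ((ls.getD i (0,0,0,0)).1 + w) (ls.length - (i + 1)) (i + 1) ls.length :=
        rfl
      have hgt : i < pvClusterEnd ls w i := by
        have := pvBsearch_ge ls ((ls.getD i (0,0,0,0)).1 + w) (ls.length - (i + 1)) (i + 1)
          ls.length
        omega
      have hle : pvClusterEnd ls w i ≤ ls.length := by
        have := pvBsearch_le ls ((ls.getD i (0,0,0,0)).1 + w) (ls.length - (i + 1)) (i + 1)
          ls.length (by omega)
        omega
      have hdropi : ls.drop i = ls.getD i (0,0,0,0) :: ls.drop (i + 1) := by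
        rw [List.getD_eq_getElem _ _ h]
        exact List.drop_eq_getElem_cons h
      have htd := pv_takeWhile_drop
        (fun q => decide (q.1 - (ls.getD i (0,0,0,0)).1 < w)) (ls.drop (i + 1))
        (pvClusterEnd ls w i - (i + 1))
        (by simp only [List.length_drop]; omega)
        (by
          intro j hj
          rw [pv_getD_drop]
          have hb := pvBsearch_lt_bound ls ((ls.getD i (0,0,0,0)).1 + w) hsort
            (ls.length - (i + 1)) (i + 1) ls.length (by omega) le_rfl
            (i + 1 + j) (by omega) (by omega)
          simp only [decide_eq_true_eq]
          omega)
        (by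
          intro hlt
          rw [pv_getD_drop]
          simp only [List.length_drop] at hlt
          have hb := pvBsearch_ge_bound ls ((ls.getD i (0,0,0,0)).1 + w)
            (ls.length - (i + 1)) (i + 1) ls.length (by omega) (by omega)
          have heq : i + 1 + (pvClusterEnd ls w i - (i + 1)) = pvClusterEnd ls w i := by omega
          rw [heq, hCE]
          simp only [decide_eq_false_iff_not]
          omega)
      rw [pvOuter, if_pos h, hdropi, pvSpan, htd.1, htd.2]
      have htail : List.drop (pvClusterEnd ls w i - (i + 1)) (List.drop (i + 1) ls)
          = List.drop (pvClusterEnd ls w i) ls := by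
        rw [List.drop_drop]; congr 1; omega
      rw [htail, ih (pvClusterEnd ls w i) (by omega)]
      congr 1
      unfold pvS
      by_cases ht : pvClusterEnd ls w i - (i + 1) = 0
      · have hr : pvClusterEnd ls w i = i + 1 := by omega
        rw [ht, hr]
        simp
      · rw [pv_getLastD_take _ _ _ (by omega) (by simp; omega), pv_getD_drop]
        have heq : i + 1 + (pvClusterEnd ls w i - (i + 1) - 1) = pvClusterEnd ls w i - 1 := by
          omega
        rw [heq]
    · rw [pvOuter, if_neg h, List.drop_eq_nil_of_le (by omega), pvSpan]

-- ===== VERDICT (by name: the statement is the Claim_ definition above) =====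
theorem merge_vertical_lines_py_spec : Claim_equal_merge_vertical_lines_py := by
  intro lines template_width _
  unfold Spec_merge_vertical_lines_py merge_vertical_lines_py merge_vertical_lines_py_alt
  by_cases h : lines = []
  · simp [h]
  · simp only [if_neg h]
    have hsort : ∀ p q : Nat, p ≤ q →
        q < (PySem.List.sorted lines (fun x : Int × Int × Int × Int => x.1) false).length →
        ((PySem.List.sorted lines (fun x : Int × Int × Int × Int => x.1) false).getD p (0,0,0,0)).1
          ≤ ((PySem.List.sorted lines (fun x : Int × Int × Int × Int => x.1) false).getD q (0,0,0,0)).1 := by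
      intro p q hpq hq
      rcases Nat.lt_or_ge p q with hlt | hge
      · have hp := PySem.List.sorted_pairwise lines (fun x : Int × Int × Int × Int => x.1)
        rw [List.pairwise_iff_getElem] at hp
        have := hp p q (by omega) hq hlt
        rw [List.getD_eq_getElem _ _ (by omega), List.getD_eq_getElem _ _ hq]
        exact this
      · have : p = q := by omega
        rw [this]
    cases hs : PySem.List.sorted lines (fun x => x.1) false with
    | nil => simp [pvOuter]
    | cons first rest =>
      rw [hs] at hsort
      show List.foldl (fun merged current =>
          let previous := merged.getLastD (0, 0, 0, 0)
          if current.1 - previous.1 < template_width then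
            merged.dropLast ++ [(previous.1, previous.2.1, current.2.2.1, current.2.2.2)]
          else merged ++ [current]) [first] rest
        = pvOuter (first :: rest) template_width (first :: rest).length 0
      rw [pvOuter_eq_span (first :: rest) template_width hsort (first :: rest).length 0 le_rfl,
        List.drop_zero, pvSpan,
        show [first] = [] ++ [pvS first []] from by simp [pvS],
        pv_fold_eq_span template_width rest first [] []]
      simp
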